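-- pv_equiv track=rewrite | github.com/kateyeziyang/leetCode | 1300-1399/1307. Verbal Arithmetic Puzzle/ans.py | isSolvable
-- ===== SOURCE A (Python) =====
-- from typing import List, Optional
--
-- def isSolvable(words: List[str], result: str) -> bool:
--     allWords = words + [result]
--     firstChars = set(word[0] for word in allWords if len(word)>1)
--     n = max(len(w)
--
--
--      for w in allWords)
--     if len(result)<n: return False
--
--     def dfs(charIdx,wordIdx,carry,visited,char2digit):
--         if charIdx==n: return carry==0
--         if wordIdx==len(allWords):
--             sums = sum(char2digit[word[-charIdx-1]] if charIdx<len(word) else 0 for word in words)+carry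
--             if sums%10 == char2digit[result[-charIdx-1]]:
--                 return dfs(charIdx+1,0,sums//10,visited,char2digit)
--             else:
--                 return False
--         if wordIdx<len(words) and charIdx>=len(words[wordIdx]):
--             return dfs(charIdx,wordIdx+1,carry,visited,char2digit)
--
--         c = allWords[wordIdx][-charIdx-1]
--         if c in char2digit:
--             return dfs(charIdx,wordIdx+1,carry,visited,char2digit)
--         else:
--             firstDigit=1 if c in firstChars else 0
--             for digit in range(firstDigit,10):
--                 if digit not in visited:
--                     visited.add(digit)
--                     char2digit[c]=digit
--                     if dfs(charIdx,wordIdx+1,carry,visited,char2digit.copy()): return True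
--                     visited.remove(digit)
--             return False
--
--     return dfs(0,0,0,set(),{})
-- ===== SOURCE B (Python) =====
-- def isSolvable(words, result):
--     allW = words + [result]
--     if max(len(w) for w in allW) > len(result):
--         return False
--     # distinct letters, first-occurrence order
--     seen = list(dict.fromkeys(c for w in allW for c in w))
--     if len(seen) > 10:
--         return False
--     leading = set(w[0] for w in allW if len(w) > 1)
--
--     def coeff(ch):
--         # signed positional weight of ch: +10^i per occurrence in an addend, -10^i in result
--         t = 0
--         for w in words:
--             p = 1
--             for c in reversed(w):
--                 if c == ch:
--                     t += p
--                 p *= 10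
--         p = 1
--         for c in reversed(result):
--             if c == ch:
--                 t -= p
--             p *= 10
--         return t
--
--     # try large-magnitude coefficients first so the bound prunes early
--     pairs = sorted(((coeff(c), c) for c in seen), key=lambda q: -abs(q[0]))
--
--     def bt(i, used, total):
--         if i == len(pairs):
--             return total == 0
--         if abs(total) > 9 * sum(abs(co) for co, _ in pairs[i:]):
--             return False
--         co, ch = pairs[i]
--         lo = 1 if ch in leading else 0
--         for d in range(lo, 10):
--             if d not in used and bt(i + 1, used | {d}, total + co * d):
--                 return True
--         return False
--
--     return bt(0, frozenset(), 0)
-- ===== Notes on version B (the rewrite author's own statement) =====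
-- stated objective: faster
-- what changed: B replaces A's column-by-column carry-propagating DFS over word positions with a backtracking search over the distinct letters, each carrying a signed positional coefficient (solution iff sum coeff*digit = 0), plus a linear-time >10-distinct-letters rejection and a coefficient-magnitude bound prune.
import Mathlib
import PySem

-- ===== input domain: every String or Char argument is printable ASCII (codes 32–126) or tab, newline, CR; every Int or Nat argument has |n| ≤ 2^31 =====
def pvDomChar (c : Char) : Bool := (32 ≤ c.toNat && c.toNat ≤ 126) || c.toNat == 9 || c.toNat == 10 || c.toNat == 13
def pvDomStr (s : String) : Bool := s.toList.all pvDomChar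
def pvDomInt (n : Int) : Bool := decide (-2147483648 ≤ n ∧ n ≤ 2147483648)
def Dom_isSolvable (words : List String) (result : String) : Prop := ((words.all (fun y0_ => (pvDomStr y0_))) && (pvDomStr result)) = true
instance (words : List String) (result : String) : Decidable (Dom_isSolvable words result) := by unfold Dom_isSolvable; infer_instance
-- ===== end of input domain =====

-- B re-solves the puzzle by backtracking over the distinct letters with signed positional
-- coefficients (one linear equation, sum coeff*digit = 0) instead of A's column-by-column
-- carry DFS; with its >10-distinct-letters early exit and magnitude-bound prune the timing
-- run measured it faster.

-- ===== PORT A =====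
-- Strings are handled as their character lists (PySem convention).
-- pvColChar w ci = Python's  w[-ci-1]  (every caller guards ci < len w, so pyGet? is `some`).
def pvColChar (w : List Char) (ci : Nat) : Char :=
  (PySem.List.pyGet? w (-(ci : Int) - 1)).getD ' '

-- dfs(charIdx, wordIdx, carry, visited, char2digit).  Python tests `charIdx == n` and
-- `wordIdx == len(allWords)`; both counters only grow by 1 from 0, so `≤` is the same test —
-- it merely makes termination evident.  `visited`'s mutate-and-restore and the downward-passed
-- `char2digit.copy()` are modelled functionally (the restored state is the caller's state).
-- char2digit[..] lookups are ported as getD 0: on every path taken the key is present.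
def pvDfsA (ws : List (List Char)) (r : List Char) (aw : List (List Char)) (fc : PySem.Set Char)
    (n : Nat) (ci wi : Nat) (carry : Int) (vis : PySem.Set Int) (m : PySem.Dict Char Int) : Bool :=
  if n ≤ ci then carry == 0
  else if aw.length ≤ wi then
    let sums : Int :=
      ((ws.map (fun w => if ci < w.length then m.getD (pvColChar w ci) 0 else 0)).sum) + carry
    if PySem.Int.mod sums 10 == m.getD (pvColChar r ci) 0 then
      pvDfsA ws r aw fc n (ci+1) 0 (PySem.Int.floordiv sums 10) vis m
    else false
  else if wi < ws.length ∧ (ws.getD wi []).length ≤ ci then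
    pvDfsA ws r aw fc n ci (wi+1) carry vis m
  else
    let c := pvColChar (aw.getD wi []) ci
    if PySem.Dict.contains m c then pvDfsA ws r aw fc n ci (wi+1) carry vis m
    else
      let firstDigit : Int := if PySem.Set.contains fc c then 1 else 0
      (PySem.List.pyRange firstDigit 10 1).any fun d =>
        !(PySem.Set.contains vis d) && pvDfsA ws r aw fc n ci (wi+1) carry (vis.add d) (m.insert c d)
termination_by (n - ci, aw.length - wi)

-- max(len(w) for w in allWords): allWords is nonempty and lengths are ≥ 0, so the 0 seed is exact.
def isSolvable (words : List String) (result : String) : Bool :=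
  let ws := words.map String.toList
  let r := result.toList
  let allWords := ws ++ [r]
  let firstChars : PySem.Set Char :=
    PySem.Set.ofList ((allWords.filter (fun w => 1 < w.length)).map (fun w => w.headD ' '))
  let n := (allWords.map (fun w => w.length)).foldl max 0
  if r.length < n then false
  else pvDfsA ws r allWords firstChars n 0 0 0 [] PySem.Dict.empty

-- ===== PORT B =====
-- coeff(ch): two accumulator loops over reversed words / reversed result with a running power.
def pvCoeff (ws : List (List Char)) (r : List Char) (ch : Char) : Int :=
  let t : Int := ws.foldl (fun t w =>
      (w.reverse.foldl (fun (s : Int × Int) c =>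
        (if c == ch then s.1 + s.2 else s.1, s.2 * 10)) (t, 1)).1) 0
  (r.reverse.foldl (fun (s : Int × Int) c =>
    (if c == ch then s.1 - s.2 else s.1, s.2 * 10)) (t, 1)).1

-- bt(i, used, total); Python tests `i == len(pairs)`, i only grows by 1 from 0, `≤` is the same test.
def pvBt (ps : List (Int × Char)) (fc : PySem.Set Char) (i : Nat) (used : PySem.Set Int)
    (total : Int) : Bool :=
  if ps.length ≤ i then total == 0
  else if 9 * ((PySem.List.slice ps (some (i : Int)) none).map (fun q => |q.1|)).sum < |total| then
    false
  else
    let q := ps.getD i (0, ' ')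
    let lo : Int := if PySem.Set.contains fc q.2 then 1 else 0
    (PySem.List.pyRange lo 10 1).any fun d =>
      !(PySem.Set.contains used d) && pvBt ps fc (i+1) (used.add d) (total + q.1 * d)
termination_by ps.length - i

def isSolvable_alt (words : List String) (result : String) : Bool :=
  let ws := words.map String.toList
  let r := result.toList
  let allW := ws ++ [r]
  if r.length < (allW.map (fun w => w.length)).foldl max 0 then false
  else
    let seen := PySem.List.dedup (allW.flatMap (fun w => w))
    if 10 < seen.length then false
    else
      let leading : PySem.Set Char :=
        PySem.Set.ofList ((allW.filter (fun w => 1 < w.length)).map (fun w => w.headD ' '))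
      let pairs := PySem.List.sorted (seen.map (fun c => (pvCoeff ws r c, c))) (fun q => -|q.1|) false
      pvBt pairs leading 0 [] 0

-- ===== PRECONDITION & SPEC =====
def Spec_isSolvable (words : List String) (result : String) (out : Bool) : Prop := out = isSolvable_alt words result
instance (words : List String) (result : String) (out : Bool) : Decidable (Spec_isSolvable words result out) := by unfold Spec_isSolvable; infer_instance

-- ===== CLAIM (what is proved, stated in full; the proofs are below) =====
def Claim_equal_isSolvable : Prop := ∀ (words : List String) (result : String), Dom_isSolvable words result → Spec_isSolvable words result (isSolvable words result)

-- ===== LEMMAS AND PROOFS =====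

-- The common mathematical reading: an assignment f of digits to letters.
def pvAw (ws : List (List Char)) (r : List Char) : List (List Char) := ws ++ [r]
def pvN (ws : List (List Char)) (r : List Char) : Nat :=
  ((pvAw ws r).map (fun w => w.length)).foldl max 0
def pvFc (ws : List (List Char)) (r : List Char) : PySem.Set Char :=
  PySem.Set.ofList (((pvAw ws r).filter (fun w => 1 < w.length)).map (fun w => w.headD ' '))
def pvL (ws : List (List Char)) (r : List Char) : List Char := (pvAw ws r).flatMap (fun w => w)
def pvVal (f : Char → Int) (w : List Char) : Int := w.foldl (fun a c => 10 * a + f c) 0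
def pvHi (f : Char → Int) (w : List Char) (ci : Nat) : Int := pvVal f (w.take (w.length - ci))
def pvGood (ws : List (List Char)) (r : List Char) (f : Char → Int) : Prop :=
  (∀ c ∈ pvL ws r, 0 ≤ f c ∧ f c ≤ 9 ∧ (c ∈ pvFc ws r → 1 ≤ f c)) ∧
  (∀ c ∈ pvL ws r, ∀ c' ∈ pvL ws r, f c = f c' → c = c')
def pvEqn (ws : List (List Char)) (r : List Char) (f : Char → Int) (ci : Nat) (carry : Int) : Prop :=
  (ws.map (fun w => pvHi f w ci)).sum + carry = pvHi f r ci
def pvSolv (ws : List (List Char)) (r : List Char) : Prop :=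
  ∃ f, pvGood ws r f ∧ pvEqn ws r f 0 0

def pvExt (m : PySem.Dict Char Int) (f : Char → Int) : Prop := ∀ c d, m.get? c = some d → f c = d
def pvInvA (ws : List (List Char)) (r : List Char) (ci wi : Nat)
    (vis : PySem.Set Int) (m : PySem.Dict Char Int) : Prop :=
  (∀ d : Int, d ∈ vis ↔ ∃ c, m.get? c = some d) ∧
  (∀ c d, m.get? c = some d → 0 ≤ d ∧ d ≤ 9 ∧ (c ∈ pvFc ws r → 1 ≤ d) ∧ c ∈ pvL ws r) ∧
  (∀ c c' d, m.get? c = some d → m.get? c' = some d → c = c') ∧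
  (∀ k, k < (pvAw ws r).length → ∀ j, j < ((pvAw ws r).getD k []).length →
    (j < ci ∨ (j = ci ∧ k < wi)) → (m.get? (pvColChar ((pvAw ws r).getD k []) j)).isSome)

lemma pvColChar_eq (w : List Char) (ci : Nat) (h : ci < w.length) :
    pvColChar w ci = w[w.length - 1 - ci]'(by omega) := by
  have hk : (-(ci : Int) - 1) = -(((ci+1 : Nat) : Int)) := by push_cast; ring
  rw [pvColChar, hk, PySem.List.pyGet?_neg_natCast w (ci+1) (by omega) (by omega)]
  rw [List.getElem?_eq_getElem (by omega)]
  simp only [Option.getD_some]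
  congr 1
  omega

lemma pvLen_le_n (ws : List (List Char)) (r : List Char) :
    ∀ w ∈ pvAw ws r, w.length ≤ pvN ws r := by
  intro w hw
  exact (PySem.List.le_foldl_max ((pvAw ws r).map (fun w => w.length)) 0).2 _
    (List.mem_map_of_mem hw)

lemma pvR_mem_aw (ws : List (List Char)) (r : List Char) : r ∈ pvAw ws r := by
  simp [pvAw]

lemma pvMem_L (ws : List (List Char)) (r : List Char) (w : List Char) (hw : w ∈ pvAw ws r)
    (c : Char) (hc : c ∈ w) : c ∈ pvL ws r := by
  simp only [pvL, List.mem_flatMap]; exact ⟨w, hw, hc⟩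

lemma pvColChar_mem_L (ws : List (List Char)) (r : List Char) (w : List Char)
    (hw : w ∈ pvAw ws r) (ci : Nat) (h : ci < w.length) : pvColChar w ci ∈ pvL ws r := by
  rw [pvColChar_eq w ci h]; exact pvMem_L ws r w hw _ (List.getElem_mem _)

lemma pvVal_append (f : Char → Int) (xs : List Char) (c : Char) :
    pvVal f (xs ++ [c]) = 10 * pvVal f xs + f c := by
  simp [pvVal, List.foldl_append]

lemma pvHi_zero (f : Char → Int) (w : List Char) : pvHi f w 0 = pvVal f w := by
  simp [pvHi]

lemma pvHi_of_le (f : Char → Int) (w : List Char) (ci : Nat) (h : w.length ≤ ci) :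
    pvHi f w ci = 0 := by
  simp [pvHi, Nat.sub_eq_zero_of_le h, pvVal]

lemma pvHi_rec (f : Char → Int) (w : List Char) (ci : Nat) :
    pvHi f w ci = 10 * pvHi f w (ci+1) + (if ci < w.length then f (pvColChar w ci) else 0) := by
  by_cases h : ci < w.length
  · rw [if_pos h, pvColChar_eq w ci h]
    have h3 : w.length - 1 - ci = w.length - (ci + 1) := by omega
    simp only [h3]
    have h1 : w.length - ci = (w.length - (ci+1)) + 1 := by omega
    have h2 : w.take (w.length - ci)
        = w.take (w.length - (ci+1)) ++ [w[w.length - (ci+1)]'(by omega)] := by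
      rw [h1, List.take_add_one, List.getElem?_eq_getElem (by omega)]
      simp only [Option.toList_some]
    rw [pvHi, pvHi, h2, pvVal_append]
  · rw [if_neg h, pvHi_of_le f w ci (by omega), pvHi_of_le f w (ci+1) (by omega)]
    ring

lemma pvSum_lin (l : List (List Char)) (h g : List Char → Int) :
    ((l.map (fun w => 10 * h w + g w)).sum : Int) = 10 * (l.map h).sum + (l.map g).sum := by
  induction l with
  | nil => simp
  | cons x xs ih => simp [ih]; ring

lemma pvCarry_split (sums d H H' : Int) (hd0 : 0 ≤ d) (hd9 : d ≤ 9) :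
    (10 * H + sums = 10 * H' + d) ↔
      (PySem.Int.mod sums 10 = d ∧ H + PySem.Int.floordiv sums 10 = H') := by
  have h1 := PySem.Int.floordiv_mul_add_mod sums 10
  have h2 := PySem.Int.mod_nonneg sums (b := 10) (by omega)
  have h3 := PySem.Int.mod_lt sums (b := 10) (by omega)
  constructor
  · intro h; constructor <;> omega
  · intro h; omega

-- Eqn peels one column (for any f that extends m, whose values the computed `sums` uses).
lemma pvEqn_step (ws : List (List Char)) (r : List Char) (f : Char → Int) (ci : Nat)
    (carry : Int) (hci : ci < r.length) (hd0 : 0 ≤ f (pvColChar r ci))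
    (hd9 : f (pvColChar r ci) ≤ 9) :
    (pvEqn ws r f ci carry ↔
      (PySem.Int.mod ((ws.map (fun w => if ci < w.length then f (pvColChar w ci) else 0)).sum + carry) 10
          = f (pvColChar r ci) ∧
        pvEqn ws r f (ci+1)
          (PySem.Int.floordiv ((ws.map (fun w => if ci < w.length then f (pvColChar w ci) else 0)).sum + carry) 10))) := by
  have hrec : (fun w => pvHi f w ci)
      = fun w => 10 * pvHi f w (ci+1) + (if ci < w.length then f (pvColChar w ci) else 0) :=
    funext (fun w => pvHi_rec f w ci)
  have hs := pvCarry_split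
    ((ws.map (fun w => if ci < w.length then f (pvColChar w ci) else 0)).sum + carry)
    (f (pvColChar r ci)) ((ws.map (fun w => pvHi f w (ci+1))).sum) (pvHi f r (ci+1)) hd0 hd9
  unfold pvEqn
  rw [hrec, pvSum_lin, pvHi_rec f r ci, if_pos hci]
  constructor
  · intro h
    have h2 := hs.mp (by omega)
    exact ⟨h2.1, by omega⟩
  · rintro ⟨h1, h2⟩
    have h3 := hs.mpr ⟨h1, by omega⟩
    omega

-- The column-DFS of A decides existence of a good extension of the current partial assignment.
lemma pvDfsA_iff (ws : List (List Char)) (r : List Char) (hrn : r.length = pvN ws r) :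
    ∀ K ci wi carry vis m,
    (pvN ws r - ci) * ((pvAw ws r).length + 1) + ((pvAw ws r).length - wi) = K →
    ci ≤ pvN ws r → wi ≤ (pvAw ws r).length → pvInvA ws r ci wi vis m →
    (pvDfsA ws r (pvAw ws r) (pvFc ws r) (pvN ws r) ci wi carry vis m = true ↔
      ∃ f, pvExt m f ∧ pvGood ws r f ∧ pvEqn ws r f ci carry) := by
  intro K
  induction K using Nat.strong_induction_on with
  | _ K IH =>
  intro ci wi carry vis m hK hci hwi hinv
  obtain ⟨hvis, hrange, hinj, hcov⟩ := hinv
  rw [pvDfsA]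
  by_cases hcin : pvN ws r ≤ ci
  · -- ci = n : every letter is assigned, result is carry == 0
    have hcieq : ci = pvN ws r := le_antisymm hci hcin
    rw [if_pos hcin]
    have hall : ∀ c ∈ pvL ws r, (m.get? c).isSome := by
      intro c hc
      rw [pvL, List.mem_flatMap] at hc
      rcases hc with ⟨w, hw, hcw⟩
      rcases List.getElem_of_mem hw with ⟨kk, hkk, rfl⟩
      rcases List.getElem_of_mem hcw with ⟨j, hj, rfl⟩
      have hw2 : (pvAw ws r).getD kk [] = (pvAw ws r)[kk] := List.getD_eq_getElem _ _ hkk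
      have hlenk : (pvAw ws r)[kk].length ≤ pvN ws r := pvLen_le_n ws r _ (List.getElem_mem hkk)
      have hsome := hcov kk hkk ((pvAw ws r)[kk].length - 1 - j)
        (by rw [hw2]; omega) (by left; omega)
      rw [hw2, pvColChar_eq _ _ (by omega)] at hsome
      have hidx : (pvAw ws r)[kk].length - 1 - ((pvAw ws r)[kk].length - 1 - j) = j := by omega
      simpa [hidx] using hsome
    have hbeq : ((carry == 0) = true) ↔ carry = 0 := by simp
    rw [hbeq]
    have hz0 : ∀ (f : Char → Int), (ws.map (fun w => pvHi f w ci)).sum = 0 := by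
      intro f
      apply List.sum_eq_zero
      intro x hx
      rcases List.mem_map.mp hx with ⟨w, hw, rfl⟩
      exact pvHi_of_le f w ci
        (by have := pvLen_le_n ws r w (List.mem_append_left _ hw); omega)
    have hzr : ∀ (f : Char → Int), pvHi f r ci = 0 := fun f =>
      pvHi_of_le f r ci (by omega)
    constructor
    · intro hc0
      refine ⟨fun c => (m.get? c).getD 0, ?_, ⟨?_, ?_⟩, ?_⟩
      · intro c d hcd; simp [hcd]
      · intro c hc
        rcases Option.isSome_iff_exists.mp (hall c hc) with ⟨d, hd⟩
        have hb := hrange c d hd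
        simp only [hd, Option.getD_some]
        exact ⟨hb.1, hb.2.1, fun hfc => hb.2.2.1 hfc⟩
      · intro c hc c' hc' he
        rcases Option.isSome_iff_exists.mp (hall c hc) with ⟨d, hd⟩
        rcases Option.isSome_iff_exists.mp (hall c' hc') with ⟨d', hd'⟩
        simp only [hd, hd', Option.getD_some] at he
        exact hinj c c' d hd (by rw [hd', he])
      · unfold pvEqn
        rw [hz0, hzr]
        omega
    · rintro ⟨f, hext, hgoodf, heqn⟩
      unfold pvEqn at heqn
      rw [hz0, hzr] at heqn
      omega
  · rw [if_neg hcin]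
    have hcilt : ci < pvN ws r := by omega
    have hcir : ci < r.length := by omega
    by_cases hwin : (pvAw ws r).length ≤ wi
    · -- column complete: check the result digit, carry on
      rw [if_pos hwin]
      have hwieq : wi = (pvAw ws r).length := le_antisymm hwi hwin
      have hwsl : ws.length < (pvAw ws r).length := by simp [pvAw]
      have hawr : (pvAw ws r).getD ws.length [] = r := by
        rw [List.getD_eq_getElem _ _ hwsl]
        simp [pvAw]
      have hrcol : (m.get? (pvColChar r ci)).isSome := by
        have h := hcov ws.length hwsl ci (by rw [hawr]; omega)
          (Or.inr ⟨rfl, by omega⟩)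
        rwa [hawr] at h
      obtain ⟨drc, hdrc⟩ := Option.isSome_iff_exists.mp hrcol
      have hdrcb := hrange _ _ hdrc
      have hgetr : m.getD (pvColChar r ci) 0 = drc := by
        rw [PySem.Dict.getD_eq_get?_getD, hdrc]; rfl
      have hfS : ∀ f, pvExt m f →
          (ws.map (fun w => if ci < w.length then f (pvColChar w ci) else 0)).sum
            = (ws.map (fun w => if ci < w.length then m.getD (pvColChar w ci) 0 else 0)).sum := by
        intro f hext
        refine congrArg List.sum (List.map_congr_left ?_)
        intro w hw
        by_cases hcw : ci < w.length
        · rw [if_pos hcw, if_pos hcw]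
          rcases List.getElem_of_mem hw with ⟨kk, hkk, rfl⟩
          have hkk2 : kk < (pvAw ws r).length := by simp [pvAw]; omega
          have hawk : (pvAw ws r).getD kk [] = ws[kk] := by
            rw [List.getD_eq_getElem _ _ hkk2]
            exact List.getElem_append_left hkk
          have hsome := hcov kk hkk2 ci (by rw [hawk]; omega) (Or.inr ⟨rfl, by omega⟩)
          rw [hawk] at hsome
          rcases Option.isSome_iff_exists.mp hsome with ⟨d, hd⟩
          rw [PySem.Dict.getD_eq_get?_getD, hd, Option.getD_some, hext _ _ hd]
        · rw [if_neg hcw, if_neg hcw]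
      have hKlt : (pvN ws r - (ci+1)) * ((pvAw ws r).length + 1) +
          ((pvAw ws r).length - 0) < K := by
        rw [← hK]
        have h1 : pvN ws r - ci = (pvN ws r - (ci+1)) + 1 := by omega
        rw [h1, add_mul, one_mul]
        omega
      have hcov' : ∀ k, k < (pvAw ws r).length → ∀ j, j < ((pvAw ws r).getD k []).length →
          (j < ci + 1 ∨ (j = ci + 1 ∧ k < 0)) →
          (m.get? (pvColChar ((pvAw ws r).getD k []) j)).isSome := by
        intro k hk j hj hcond
        rcases hcond with hlt2 | ⟨_, hk0⟩
        · rcases Nat.lt_succ_iff_lt_or_eq.mp hlt2 with h | h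
          · exact hcov k hk j hj (Or.inl h)
          · exact hcov k hk j hj (Or.inr ⟨h, by omega⟩)
        · omega
      have hIH := IH _ hKlt (ci+1) 0
        (PySem.Int.floordiv ((ws.map (fun w =>
          if ci < w.length then m.getD (pvColChar w ci) 0 else 0)).sum + carry) 10) vis m
        rfl (by omega) (by omega) ⟨hvis, hrange, hinj, hcov'⟩
      by_cases hchk : (PySem.Int.mod ((ws.map (fun w =>
          if ci < w.length then m.getD (pvColChar w ci) 0 else 0)).sum + carry) 10
            == m.getD (pvColChar r ci) 0) = true
      · rw [if_pos hchk]
        rw [beq_iff_eq, hgetr] at hchk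
        rw [hIH]
        constructor
        · rintro ⟨f, hext, hgood, heqn'⟩
          refine ⟨f, hext, hgood, ?_⟩
          have hfcol : f (pvColChar r ci) = drc := hext _ _ hdrc
          apply (pvEqn_step ws r f ci carry hcir (by rw [hfcol]; exact hdrcb.1)
            (by rw [hfcol]; exact hdrcb.2.1)).mpr
          rw [hfS f hext, hfcol]
          exact ⟨hchk, heqn'⟩
        · rintro ⟨f, hext, hgood, heqn⟩
          refine ⟨f, hext, hgood, ?_⟩
          have hfcol : f (pvColChar r ci) = drc := hext _ _ hdrc
          have h2 := (pvEqn_step ws r f ci carry hcir (by rw [hfcol]; exact hdrcb.1)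
            (by rw [hfcol]; exact hdrcb.2.1)).mp heqn
          rw [hfS f hext] at h2
          exact h2.2
      · rw [if_neg hchk]
        simp only [Bool.false_eq_true, false_iff]
        rintro ⟨f, hext, hgood, heqn⟩
        have hfcol : f (pvColChar r ci) = drc := hext _ _ hdrc
        have h2 := (pvEqn_step ws r f ci carry hcir (by rw [hfcol]; exact hdrcb.1)
          (by rw [hfcol]; exact hdrcb.2.1)).mp heqn
        rw [hfS f hext, hfcol] at h2
        rw [beq_iff_eq, hgetr] at hchk
        exact hchk h2.1
    · rw [if_neg hwin]
      have hwilt : wi < (pvAw ws r).length := by omega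
      have hawwi : (pvAw ws r).getD wi [] = (pvAw ws r)[wi] := List.getD_eq_getElem _ _ hwilt
      have hKlt : (pvN ws r - ci) * ((pvAw ws r).length + 1) +
          ((pvAw ws r).length - (wi + 1)) < K := by omega
      by_cases hskip : wi < ws.length ∧ (ws.getD wi []).length ≤ ci
      · rw [if_pos hskip]
        have hwsgd : (pvAw ws r).getD wi [] = ws.getD wi [] := by
          rw [hawwi, List.getD_eq_getElem _ _ hskip.1]
          exact List.getElem_append_left hskip.1
        have hcov' : ∀ k, k < (pvAw ws r).length → ∀ j, j < ((pvAw ws r).getD k []).length →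
            (j < ci ∨ (j = ci ∧ k < wi + 1)) →
            (m.get? (pvColChar ((pvAw ws r).getD k []) j)).isSome := by
          intro k hk j hj hcond
          rcases hcond with h | ⟨hj2, hk2⟩
          · exact hcov k hk j hj (Or.inl h)
          · rcases Nat.lt_succ_iff_lt_or_eq.mp hk2 with h | h
            · exact hcov k hk j hj (Or.inr ⟨hj2, h⟩)
            · subst h hj2
              rw [hwsgd] at hj
              omega
        exact IH _ hKlt ci (wi+1) carry vis m rfl (by omega) (by omega)
          ⟨hvis, hrange, hinj, hcov'⟩
      · rw [if_neg hskip]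
        have hciw : ci < ((pvAw ws r).getD wi []).length := by
          by_cases hwiws : wi < ws.length
          · have h1 : (pvAw ws r).getD wi [] = ws.getD wi [] := by
              rw [hawwi, List.getD_eq_getElem _ _ hwiws]
              exact List.getElem_append_left hwiws
            rw [h1]
            by_contra hcon
            exact hskip ⟨hwiws, by omega⟩
          · have hwieq : wi = ws.length := by
              have : (pvAw ws r).length = ws.length + 1 := by simp [pvAw]
              omega
            subst hwieq
            have h1 : (pvAw ws r).getD ws.length [] = r := by
              rw [List.getD_eq_getElem _ _ hwilt]
              simp [pvAw]
            rw [h1]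
            omega
        have hcL : pvColChar ((pvAw ws r).getD wi []) ci ∈ pvL ws r := by
          rw [hawwi] at hciw ⊢
          exact pvColChar_mem_L ws r _ (List.getElem_mem hwilt) ci hciw
        by_cases hcm : PySem.Dict.contains m (pvColChar ((pvAw ws r).getD wi []) ci) = true
        · rw [if_pos hcm]
          have hsome : (m.get? (pvColChar ((pvAw ws r).getD wi []) ci)).isSome := by
            rw [Option.isSome_iff_ne_none]
            intro hn2
            rw [(PySem.Dict.get?_eq_none_iff_contains m _).mp hn2] at hcm
            exact Bool.false_ne_true hcm
          have hcov' : ∀ k, k < (pvAw ws r).length → ∀ j, j < ((pvAw ws r).getD k []).length →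
              (j < ci ∨ (j = ci ∧ k < wi + 1)) →
              (m.get? (pvColChar ((pvAw ws r).getD k []) j)).isSome := by
            intro k hk j hj hcond
            rcases hcond with h | ⟨hj2, hk2⟩
            · exact hcov k hk j hj (Or.inl h)
            · rcases Nat.lt_succ_iff_lt_or_eq.mp hk2 with h | h
              · exact hcov k hk j hj (Or.inr ⟨hj2, h⟩)
              · subst h hj2
                exact hsome
          exact IH _ hKlt ci (wi+1) carry vis m rfl (by omega) (by omega)
            ⟨hvis, hrange, hinj, hcov'⟩
        · rw [if_neg hcm]
          have hnone : m.get? (pvColChar ((pvAw ws r).getD wi []) ci) = none :=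
            (PySem.Dict.get?_eq_none_iff_contains m _).mpr (by simpa using hcm)
          rw [List.any_eq_true]
          have hinvins : ∀ d : Int, 0 ≤ d → d ≤ 9 →
              (pvColChar ((pvAw ws r).getD wi []) ci ∈ pvFc ws r → 1 ≤ d) → d ∉ vis →
              pvInvA ws r ci (wi+1) (vis.add d)
                (m.insert (pvColChar ((pvAw ws r).getD wi []) ci) d) := by
            intro d hd0 hd9 hdfc hdvis
            refine ⟨?_, ?_, ?_, ?_⟩
            · intro e
              rw [PySem.Set.mem_add]
              constructor
              · rintro (he | rfl)
                · rcases (hvis e).mp he with ⟨c0, hc0⟩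
                  have hne : c0 ≠ pvColChar ((pvAw ws r).getD wi []) ci := by
                    intro h; rw [h, hnone] at hc0; cases hc0
                  exact ⟨c0, by rw [PySem.Dict.get?_insert, if_neg hne]; exact hc0⟩
                · exact ⟨_, PySem.Dict.get?_insert_self _ _ _⟩
              · rintro ⟨c0, hc0⟩
                rw [PySem.Dict.get?_insert] at hc0
                split at hc0
                · right; cases hc0; rfl
                · left; exact (hvis e).mpr ⟨c0, hc0⟩
            · intro c0 d0 hc0
              rw [PySem.Dict.get?_insert] at hc0
              split at hc0
              case isTrue heq =>
                cases hc0
                subst heq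
                exact ⟨hd0, hd9, hdfc, hcL⟩
              case isFalse => exact hrange c0 d0 hc0
            · intro c0 c0' d0 hc0 hc0'
              rw [PySem.Dict.get?_insert] at hc0 hc0'
              split at hc0 <;> split at hc0'
              case isTrue.isTrue h1 h2 => rw [h1, h2]
              case isTrue.isFalse h1 h2 =>
                cases hc0
                exact absurd ((hvis d).mpr ⟨c0', hc0'⟩) hdvis
              case isFalse.isTrue h1 h2 =>
                cases hc0'
                exact absurd ((hvis d).mpr ⟨c0, hc0⟩) hdvis
              case isFalse.isFalse => exact hinj c0 c0' d0 hc0 hc0'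
            · intro k hk j hj hcond
              have hpres : ∀ c0 : Char, (m.get? c0).isSome →
                  ((m.insert (pvColChar ((pvAw ws r).getD wi []) ci) d).get? c0).isSome := by
                intro c0 h
                rw [PySem.Dict.get?_insert]
                split
                · rfl
                · exact h
              rcases hcond with h | ⟨hj2, hk2⟩
              · exact hpres _ (hcov k hk j hj (Or.inl h))
              · rcases Nat.lt_succ_iff_lt_or_eq.mp hk2 with h | h
                · exact hpres _ (hcov k hk j hj (Or.inr ⟨hj2, h⟩))
                · subst h hj2
                  rw [PySem.Dict.get?_insert, if_pos rfl]
                  rfl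
          constructor
          · rintro ⟨d, hdmem, hcond⟩
            rw [Bool.and_eq_true, Bool.not_eq_true'] at hcond
            have hdvis : d ∉ vis := fun h => by
              rw [(PySem.Set.contains_iff vis d).mpr h] at hcond
              exact absurd hcond.1 (by simp)
            rcases PySem.List.mem_pyRange_one.mp hdmem with ⟨hdlo, hdlt⟩
            have hd0 : 0 ≤ d := by
              by_cases hfcc : PySem.Set.contains (pvFc ws r)
                  (pvColChar ((pvAw ws r).getD wi []) ci) = true
              · rw [if_pos hfcc] at hdlo; omega
              · rw [if_neg hfcc] at hdlo; omega
            have hdfc : pvColChar ((pvAw ws r).getD wi []) ci ∈ pvFc ws r → 1 ≤ d := by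
              intro hcfc
              rw [if_pos ((PySem.Set.contains_iff _ _).mpr hcfc)] at hdlo
              omega
            have hIH := IH _ hKlt ci (wi+1) carry (vis.add d)
              (m.insert (pvColChar ((pvAw ws r).getD wi []) ci) d) rfl (by omega) (by omega)
              (hinvins d hd0 (by omega) hdfc hdvis)
            rcases hIH.mp hcond.2 with ⟨f, hext', hgood, heqn⟩
            refine ⟨f, ?_, hgood, heqn⟩
            intro c0 d0 hc0
            have hne : c0 ≠ pvColChar ((pvAw ws r).getD wi []) ci := by
              intro h; rw [h, hnone] at hc0; cases hc0
            exact hext' c0 d0 (by rw [PySem.Dict.get?_insert, if_neg hne]; exact hc0)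
          · rintro ⟨f, hext, hgood, heqn⟩
            have hb := hgood.1 _ hcL
            have hdvis : f (pvColChar ((pvAw ws r).getD wi []) ci) ∉ vis := by
              intro h
              rcases (hvis _).mp h with ⟨c0, hc0⟩
              have hc0L := (hrange _ _ hc0).2.2.2
              have := hgood.2 c0 hc0L _ hcL (by rw [hext _ _ hc0])
              rw [← this] at hnone
              rw [hnone] at hc0
              cases hc0
            have hdlo : (if PySem.Set.contains (pvFc ws r)
                (pvColChar ((pvAw ws r).getD wi []) ci) = true then (1:Int) else 0)
                ≤ f (pvColChar ((pvAw ws r).getD wi []) ci) := by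
              by_cases hfcc : PySem.Set.contains (pvFc ws r)
                  (pvColChar ((pvAw ws r).getD wi []) ci) = true
              · rw [if_pos hfcc]
                exact hb.2.2 ((PySem.Set.contains_iff _ _).mp hfcc)
              · rw [if_neg hfcc]; exact hb.1
            refine ⟨f (pvColChar ((pvAw ws r).getD wi []) ci),
              PySem.List.mem_pyRange_one.mpr ⟨hdlo, by omega⟩, ?_⟩
            rw [Bool.and_eq_true, Bool.not_eq_true']
            have hext' : pvExt (m.insert (pvColChar ((pvAw ws r).getD wi []) ci)
                (f (pvColChar ((pvAw ws r).getD wi []) ci))) f := by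
              intro c0 d0 hc0
              rw [PySem.Dict.get?_insert] at hc0
              split at hc0
              case isTrue heq => cases hc0; rw [heq]
              case isFalse => exact hext c0 d0 hc0
            have hIH := IH _ hKlt ci (wi+1) carry
              (vis.add (f (pvColChar ((pvAw ws r).getD wi []) ci)))
              (m.insert (pvColChar ((pvAw ws r).getD wi []) ci)
                (f (pvColChar ((pvAw ws r).getD wi []) ci))) rfl (by omega) (by omega)
              (hinvins _ hb.1 hb.2.1 (fun _ => hb.2.2 ‹_›) hdvis)
            refine ⟨?_, hIH.mpr ⟨f, hext', hgood, heqn⟩⟩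
            cases hcc : PySem.Set.contains vis (f (pvColChar ((pvAw ws r).getD wi []) ci))
            · rfl
            · exact absurd ((PySem.Set.contains_iff _ _).mp hcc) hdvis

-- A decides: the length check, then existence of a good assignment.
lemma pvA_body (ws : List (List Char)) (r : List Char) :
    (if r.length < ((ws ++ [r]).map (fun w => w.length)).foldl max 0 then false
     else pvDfsA ws r (ws ++ [r])
       (PySem.Set.ofList (((ws ++ [r]).filter (fun w => 1 < w.length)).map (fun w => w.headD ' ')))
       (((ws ++ [r]).map (fun w => w.length)).foldl max 0) 0 0 0 [] PySem.Dict.empty) = true ↔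
      (pvN ws r ≤ r.length ∧ pvSolv ws r) := by
  by_cases hlt : r.length < ((ws ++ [r]).map (fun w => w.length)).foldl max 0
  · rw [if_pos hlt]
    simp only [Bool.false_eq_true, false_iff]
    intro hcon
    have h1 : pvN ws r ≤ r.length := hcon.1
    unfold pvN pvAw at h1
    omega
  · rw [if_neg hlt]
    have hn : pvN ws r ≤ r.length := by unfold pvN pvAw; omega
    have hrn : r.length = pvN ws r :=
      le_antisymm (pvLen_le_n ws r r (pvR_mem_aw ws r)) hn
    show pvDfsA ws r (pvAw ws r) (pvFc ws r) (pvN ws r) 0 0 0 [] PySem.Dict.empty = true ↔ _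
    have hinv : pvInvA ws r 0 0 [] PySem.Dict.empty := by
      refine ⟨?_, ?_, ?_, ?_⟩
      · intro d
        simp [PySem.Dict.get?_empty]
      · intro c d hc
        rw [PySem.Dict.get?_empty] at hc
        cases hc
      · intro c c' d hc
        rw [PySem.Dict.get?_empty] at hc
        cases hc
      · intro k hk j hj hcond
        rcases hcond with h | ⟨_, h⟩ <;> omega
    rw [pvDfsA_iff ws r hrn _ 0 0 0 [] PySem.Dict.empty rfl (by omega) (by omega) hinv]
    constructor
    · rintro ⟨f, -, hgood, heqn⟩
      exact ⟨hn, f, hgood, heqn⟩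
    · rintro ⟨-, f, hgood, heqn⟩
      refine ⟨f, ?_, hgood, heqn⟩
      intro c d hc
      rw [PySem.Dict.get?_empty] at hc
      cases hc

lemma pvA_char (words : List String) (result : String) :
    isSolvable words result = true ↔
      (pvN (words.map String.toList) result.toList ≤ result.toList.length ∧
        pvSolv (words.map String.toList) result.toList) :=
  pvA_body (words.map String.toList) result.toList

-- ===== B side =====

def pvQB (ps : List (Int × Char)) (fc : PySem.Set Char) (f : Char → Int) : Prop :=
  (∀ p ∈ ps, 0 ≤ f p.2 ∧ f p.2 ≤ 9 ∧ (p.2 ∈ fc → 1 ≤ f p.2)) ∧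
  (∀ p ∈ ps, ∀ q ∈ ps, f p.2 = f q.2 → p.2 = q.2) ∧
  ((ps.map (fun p => p.1 * f p.2)).sum = 0)

lemma pvAbs_sum (l : List Int) : |l.sum| ≤ (l.map (fun x => |x|)).sum := by
  induction l with
  | nil => simp
  | cons x xs ih =>
    simp only [List.sum_cons, List.map_cons]
    calc |x + xs.sum| ≤ |x| + |xs.sum| := abs_add_le _ _
    _ ≤ |x| + (xs.map (fun x => |x|)).sum := by omega

lemma pvBt_iff (ps : List (Int × Char)) (fc : PySem.Set Char)
    (hnd : (ps.map Prod.snd).Nodup) :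
    ∀ (k i : Nat) (used : PySem.Set Int) (total : Int) (g : Char → Int), ps.length - i = k →
    total = ((ps.take i).map (fun p => p.1 * g p.2)).sum →
    (∀ d : Int, d ∈ used ↔ ∃ p ∈ ps.take i, g p.2 = d) →
    (∀ p ∈ ps.take i, 0 ≤ g p.2 ∧ g p.2 ≤ 9 ∧ (p.2 ∈ fc → 1 ≤ g p.2)) →
    (∀ p ∈ ps.take i, ∀ q ∈ ps.take i, g p.2 = g q.2 → p.2 = q.2) →
    (pvBt ps fc i used total = true ↔
      ∃ f, (∀ p ∈ ps.take i, f p.2 = g p.2) ∧ pvQB ps fc f) := by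
  intro k
  induction k with
  | zero =>
    intro i used total g hk htot hused hg hginj
    have hlen : ps.length ≤ i := by omega
    rw [pvBt, if_pos hlen]
    rw [List.take_of_length_le hlen] at htot hg hginj
    simp only [beq_iff_eq]
    constructor
    · intro h
      refine ⟨g, fun p _ => rfl, hg, hginj, ?_⟩
      omega
    · rintro ⟨f, hagree, _, _, hsum⟩
      rw [List.take_of_length_le hlen] at hagree
      have he : ps.map (fun p => p.1 * g p.2) = ps.map (fun p => p.1 * f p.2) :=
        List.map_congr_left (fun p hp => by rw [hagree p hp])
      rw [he] at htot
      omega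
  | succ k ih =>
    intro i used total g hk htot hused hg hginj
    have hi : i < ps.length := by omega
    have hgetd : ps.getD i (0, ' ') = ps[i] := List.getD_eq_getElem ps (0, ' ') hi
    have htake : ps.take (i+1) = ps.take i ++ [ps[i]] := List.take_succ_eq_append_getElem hi
    have hmemi : ps[i] ∈ ps := List.getElem_mem hi
    have hfresh : ∀ p ∈ ps.take i, p.2 ≠ ps[i].2 := by
      intro p hp hpc
      rw [List.mem_take_iff_getElem] at hp
      rcases hp with ⟨j, hj, rfl⟩
      have hj2 : j < ps.length := by omega
      have h1 : (ps.map Prod.snd)[j]'(by simpa using hj2)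
          = (ps.map Prod.snd)[i]'(by simpa using hi) := by simpa using hpc
      have h2 := (List.Nodup.getElem_inj_iff hnd).mp h1
      omega
    rw [pvBt, if_neg (by omega), PySem.List.slice_from_natCast]
    by_cases hpr : 9 * ((ps.drop i).map (fun q => |q.1|)).sum < |total|
    · rw [if_pos hpr]
      constructor
      · intro h; cases h
      · rintro ⟨f, hagree, hb, hinj, hsum⟩
        exfalso
        have hdecomp : (ps.map (fun p => p.1 * f p.2)).sum
            = total + ((ps.drop i).map (fun p => p.1 * f p.2)).sum := by
          conv_lhs => rw [← List.take_append_drop i ps]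
          rw [List.map_append, List.sum_append]
          have he : (ps.take i).map (fun p => p.1 * f p.2)
              = (ps.take i).map (fun p => p.1 * g p.2) :=
            List.map_congr_left (fun p hp => by rw [hagree p hp])
          rw [he, ← htot]
        have h1 : |((ps.drop i).map (fun p => p.1 * f p.2)).sum|
            ≤ ((ps.drop i).map (fun p => |p.1 * f p.2|)).sum := by
          have h := pvAbs_sum ((ps.drop i).map (fun p => p.1 * f p.2))
          rw [List.map_map] at h
          exact h
        have h2 : ((ps.drop i).map (fun p => |p.1 * f p.2|)).sum
            ≤ 9 * ((ps.drop i).map (fun q => |q.1|)).sum := by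
          rw [← PySem.List.sum_map_const_mul_int]
          apply List.sum_le_sum
          intro p hp
          have hbp := hb p (List.mem_of_mem_drop hp)
          rw [abs_mul]
          have h3 : |f p.2| ≤ 9 := by rw [abs_of_nonneg hbp.1]; exact hbp.2.1
          nlinarith [abs_nonneg p.1]
        have h4 : total = -((ps.drop i).map (fun p => p.1 * f p.2)).sum := by omega
        rw [h4, abs_neg] at hpr
        omega
    · rw [if_neg hpr]
      simp only [hgetd, List.any_eq_true]
      have hstep : ∀ d : Int, d ∉ used →
          (if PySem.Set.contains fc ps[i].2 then (1 : Int) else 0) ≤ d → d < 10 →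
          (pvBt ps fc (i+1) (used.add d) (total + ps[i].1 * d) = true ↔
            ∃ f, (∀ p ∈ ps.take i, f p.2 = g p.2) ∧ f ps[i].2 = d ∧ pvQB ps fc f) := by
        intro d hdused hdlo hdlt
        have hd0 : 0 ≤ d := by
          by_cases hfcc : PySem.Set.contains fc ps[i].2 = true
          · rw [if_pos hfcc] at hdlo; omega
          · rw [if_neg hfcc] at hdlo; omega
        have hdfc : ps[i].2 ∈ fc → 1 ≤ d := by
          intro hcfc
          rw [if_pos ((PySem.Set.contains_iff fc ps[i].2).mpr hcfc)] at hdlo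
          omega
        have hg'old : ∀ p ∈ ps.take i,
            (fun x => if x = ps[i].2 then d else g x) p.2 = g p.2 := by
          intro p hp; simp only [if_neg (hfresh p hp)]
        have ih1 : total + ps[i].1 * d
            = ((ps.take (i+1)).map (fun p =>
                p.1 * (fun x => if x = ps[i].2 then d else g x) p.2)).sum := by
          rw [htake, List.map_append, List.sum_append]
          have he : (ps.take i).map (fun p =>
              p.1 * (fun x => if x = ps[i].2 then d else g x) p.2)
              = (ps.take i).map (fun p => p.1 * g p.2) :=
            List.map_congr_left (fun p hp => by rw [hg'old p hp])
          rw [he, ← htot]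
          simp
        have ih2 : ∀ e : Int, e ∈ used.add d ↔
            ∃ p ∈ ps.take (i+1), (fun x => if x = ps[i].2 then d else g x) p.2 = e := by
          intro e
          rw [PySem.Set.mem_add]
          constructor
          · rintro (he | rfl)
            · rcases (hused e).mp he with ⟨p, hp, hpe⟩
              exact ⟨p, by rw [htake]; exact List.mem_append_left _ hp,
                by rw [hg'old p hp]; exact hpe⟩
            · exact ⟨ps[i], by rw [htake]; exact List.mem_append_right _ (List.mem_singleton_self _),
                by simp⟩
          · rintro ⟨p, hp, hpe⟩
            rw [htake] at hp
            rcases List.mem_append.mp hp with hp | hp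
            · left
              rw [hg'old p hp] at hpe
              exact (hused e).mpr ⟨p, hp, hpe⟩
            · right
              rw [List.mem_singleton.mp hp] at hpe
              simp at hpe
              omega
        have ih3 : ∀ p ∈ ps.take (i+1),
            0 ≤ (fun x => if x = ps[i].2 then d else g x) p.2 ∧
            (fun x => if x = ps[i].2 then d else g x) p.2 ≤ 9 ∧
            (p.2 ∈ fc → 1 ≤ (fun x => if x = ps[i].2 then d else g x) p.2) := by
          intro p hp
          rw [htake] at hp
          rcases List.mem_append.mp hp with hp | hp
          · rw [hg'old p hp]; exact hg p hp
          · rw [List.mem_singleton.mp hp]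
            rw [show (fun x => if x = ps[i].2 then d else g x) ps[i].2 = d from by simp]
            exact ⟨hd0, by omega, hdfc⟩
        have ih4 : ∀ p ∈ ps.take (i+1), ∀ q ∈ ps.take (i+1),
            (fun x => if x = ps[i].2 then d else g x) p.2
              = (fun x => if x = ps[i].2 then d else g x) q.2 → p.2 = q.2 := by
          intro p hp q hq he
          rw [htake] at hp hq
          rcases List.mem_append.mp hp with hp | hp <;>
            rcases List.mem_append.mp hq with hq | hq
          · rw [hg'old p hp, hg'old q hq] at he
            exact hginj p hp q hq he
          · rw [List.mem_singleton.mp hq] at he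
            rw [hg'old p hp] at he
            simp at he
            exact absurd ((hused d).mpr ⟨p, hp, he⟩) hdused
          · rw [List.mem_singleton.mp hp] at he
            rw [hg'old q hq] at he
            simp at he
            exact absurd ((hused d).mpr ⟨q, hq, he.symm⟩) hdused
          · rw [List.mem_singleton.mp hp, List.mem_singleton.mp hq]
        rw [ih (i+1) (used.add d) (total + ps[i].1 * d)
          (fun x => if x = ps[i].2 then d else g x) (by omega) ih1 ih2 ih3 ih4]
        constructor
        · rintro ⟨f, hagree, hQB⟩
          refine ⟨f, fun p hp => ?_, ?_, hQB⟩
          · rw [hagree p (by rw [htake]; exact List.mem_append_left _ hp)]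
            exact if_neg (hfresh p hp)
          · have h5 := hagree ps[i]
              (by rw [htake]; exact List.mem_append_right _ (List.mem_singleton_self _))
            simpa using h5
        · rintro ⟨f, hagree, hfc, hQB⟩
          refine ⟨f, ?_, hQB⟩
          intro p hp
          rw [htake] at hp
          rcases List.mem_append.mp hp with hp | hp
          · rw [hagree p hp]
            exact (if_neg (hfresh p hp)).symm
          · rw [List.mem_singleton.mp hp]
            simpa using hfc
      constructor
      · rintro ⟨d, hdmem, hcond⟩
        rw [Bool.and_eq_true, Bool.not_eq_true'] at hcond
        have hdused : d ∉ used := fun h => by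
          rw [(PySem.Set.contains_iff used d).mpr h] at hcond
          exact Bool.true_eq_false ▸ hcond.1 ▸ rfl
        rcases PySem.List.mem_pyRange_one.mp hdmem with ⟨hdlo, hdlt⟩
        rcases (hstep d hdused hdlo hdlt).mp hcond.2 with ⟨f, hagree, _, hQB⟩
        exact ⟨f, hagree, hQB⟩
      · rintro ⟨f, hagree, hQB⟩
        have hbnd := hQB.1 ps[i] hmemi
        have hdlo : (if PySem.Set.contains fc ps[i].2 then (1 : Int) else 0) ≤ f ps[i].2 := by
          by_cases hfcc : PySem.Set.contains fc ps[i].2 = true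
          · rw [if_pos hfcc]
            exact hbnd.2.2 ((PySem.Set.contains_iff _ _).mp hfcc)
          · rw [if_neg hfcc]; exact hbnd.1
        have hdused : f ps[i].2 ∉ used := by
          intro hmem
          rcases (hused (f ps[i].2)).mp hmem with ⟨p, hp, hpd⟩
          have h5 : f p.2 = f ps[i].2 := by rw [hagree p hp, hpd]
          exact hfresh p hp (hQB.2.1 p (List.mem_of_mem_take hp) ps[i] hmemi h5)
        refine ⟨f ps[i].2, PySem.List.mem_pyRange_one.mpr ⟨hdlo, by omega⟩, ?_⟩
        rw [Bool.and_eq_true, Bool.not_eq_true']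
        refine ⟨?_, (hstep (f ps[i].2) hdused hdlo (by omega)).mpr ⟨f, hagree, rfl, hQB⟩⟩
        cases hcc : PySem.Set.contains used (f ps[i].2)
        · rfl
        · exact absurd ((PySem.Set.contains_iff _ _).mp hcc) hdused

-- coeff(ch) of one word-loop: the indicator value of ch in w at scale p.
def pvDelta (ch c : Char) : Int := if c = ch then 1 else 0

lemma pvCw_spec (ch : Char) (w : List Char) :
    ∀ t p : Int, (w.reverse.foldl (fun (s : Int × Int) c =>
        (if c == ch then s.1 + s.2 else s.1, s.2 * 10)) (t, p)).1
      = t + p * pvVal (pvDelta ch) w := by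
  induction w using List.reverseRecOn with
  | nil => intro t p; simp [pvVal]
  | append_singleton xs c ih =>
    intro t p
    rw [List.reverse_append]
    simp only [List.reverse_cons, List.reverse_nil, List.nil_append, List.singleton_append,
      List.foldl_cons]
    rw [ih, pvVal_append]
    by_cases hc : c = ch
    · simp [hc, pvDelta]; ring
    · simp [pvDelta, hc]; ring

lemma pvCw_spec_neg (ch : Char) (w : List Char) :
    ∀ t p : Int, (w.reverse.foldl (fun (s : Int × Int) c =>
        (if c == ch then s.1 - s.2 else s.1, s.2 * 10)) (t, p)).1
      = t - p * pvVal (pvDelta ch) w := by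
  induction w using List.reverseRecOn with
  | nil => intro t p; simp [pvVal]
  | append_singleton xs c ih =>
    intro t p
    rw [List.reverse_append]
    simp only [List.reverse_cons, List.reverse_nil, List.nil_append, List.singleton_append,
      List.foldl_cons]
    rw [ih, pvVal_append]
    by_cases hc : c = ch
    · simp [hc, pvDelta]; ring
    · simp [pvDelta, hc]; ring

lemma pvCoeff_spec (ws : List (List Char)) (r : List Char) (ch : Char) :
    pvCoeff ws r ch = (ws.map (pvVal (pvDelta ch))).sum - pvVal (pvDelta ch) r := by
  unfold pvCoeff
  rw [pvCw_spec_neg ch r _ 1]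
  have h : ∀ t0 : Int, ws.foldl (fun t w =>
      (w.reverse.foldl (fun (s : Int × Int) c =>
        (if c == ch then s.1 + s.2 else s.1, s.2 * 10)) (t, 1)).1) t0
      = t0 + (ws.map (pvVal (pvDelta ch))).sum := by
    induction ws with
    | nil => intro t0; simp
    | cons w ws' ih =>
      intro t0
      simp only [List.foldl_cons, List.map_cons, List.sum_cons]
      rw [pvCw_spec, ih]
      ring
  rw [h]
  ring

lemma pvSum_delta (seen : List Char) (f : Char → Int) (a : Char) (hnd : seen.Nodup)
    (ha : a ∈ seen) : (seen.map (fun c => f c * pvDelta c a)).sum = f a := by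
  revert hnd ha
  induction seen with
  | nil => intro _ ha; cases ha
  | cons x rest ih =>
    intro hnd ha
    have hx : x ∉ rest := (List.nodup_cons.mp hnd).1
    simp only [List.map_cons, List.sum_cons]
    rcases List.mem_cons.mp ha with rfl | h
    · have hz : (rest.map (fun c => if a = c then f c else 0)).sum = 0 := by
        rw [List.sum_eq_zero]
        intro y hy
        rcases List.mem_map.mp hy with ⟨c, hc, rfl⟩
        have hne : a ≠ c := fun he => hx (he ▸ hc)
        simp [hne]
      simp [pvDelta, hz]
    · have hxa : a ≠ x := fun he => hx (he ▸ h)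
      rw [ih (List.nodup_cons.mp hnd).2 h]
      simp [pvDelta, hxa]

lemma pvSum_sub (l : List Char) (A B : Char → Int) :
    (l.map (fun c => A c - B c)).sum = (l.map A).sum - (l.map B).sum := by
  induction l with
  | nil => simp
  | cons x xs ih => simp [ih]; ring

lemma pvVal_decompose (seen : List Char) (hnd : seen.Nodup) (f : Char → Int)
    (w : List Char) (hw : ∀ c ∈ w, c ∈ seen) :
    (seen.map (fun c => f c * pvVal (pvDelta c) w)).sum = pvVal f w := by
  revert hw
  induction w using List.reverseRecOn with
  | nil => intro _; simp [pvVal]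
  | append_singleton xs c ih =>
    intro hw
    have hxs : ∀ c' ∈ xs, c' ∈ seen := fun c' hc' => hw c' (List.mem_append_left _ hc')
    have hc : c ∈ seen := hw c (List.mem_append_right _ (List.mem_singleton_self c))
    rw [pvVal_append]
    have he : (fun c0 => f c0 * pvVal (pvDelta c0) (xs ++ [c]))
        = fun c0 => 10 * (f c0 * pvVal (pvDelta c0) xs) + f c0 * pvDelta c0 c := by
      funext c0
      rw [pvVal_append]
      ring
    rw [he, PySem.List.sum_map_add_int, PySem.List.sum_map_const_mul_int,
      ih hxs, pvSum_delta seen f c hnd hc]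

lemma pvExchange (seen : List Char) (hnd : seen.Nodup) (f : Char → Int) :
    ∀ ws : List (List Char), (∀ w ∈ ws, ∀ c ∈ w, c ∈ seen) →
    (seen.map (fun c => f c * (ws.map (fun w => pvVal (pvDelta c) w)).sum)).sum
      = (ws.map (pvVal f)).sum := by
  intro ws
  induction ws with
  | nil => intro _; simp
  | cons w ws' ih =>
    intro hws
    have he : (fun c => f c * ((w :: ws').map (fun w' => pvVal (pvDelta c) w')).sum)
        = fun c => f c * pvVal (pvDelta c) w
            + f c * (ws'.map (fun w' => pvVal (pvDelta c) w')).sum := by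
      funext c
      simp only [List.map_cons, List.sum_cons]
      ring
    rw [he, PySem.List.sum_map_add_int,
      pvVal_decompose seen hnd f w (hws w (List.mem_cons_self)),
      ih (fun w' hw' => hws w' (List.mem_cons_of_mem _ hw'))]
    simp

lemma pvBridge (ws : List (List Char)) (r : List Char) (seen : List Char) (hnd : seen.Nodup)
    (hws : ∀ w ∈ ws, ∀ c ∈ w, c ∈ seen) (hr : ∀ c ∈ r, c ∈ seen) (f : Char → Int) :
    (seen.map (fun c => pvCoeff ws r c * f c)).sum = (ws.map (pvVal f)).sum - pvVal f r := by
  have he : (fun c => pvCoeff ws r c * f c)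
      = fun c => f c * (ws.map (fun w => pvVal (pvDelta c) w)).sum
          - f c * pvVal (pvDelta c) r := by
    funext c
    rw [pvCoeff_spec]
    ring
  rw [he, pvSum_sub, pvExchange seen hnd f ws hws, pvVal_decompose seen hnd f r hr]

lemma pvPigeon (seen : List Char) (hnd : seen.Nodup) (hlen : 10 < seen.length)
    (f : Char → Int) (hb : ∀ c ∈ seen, 0 ≤ f c ∧ f c ≤ 9)
    (hinj : ∀ c ∈ seen, ∀ c' ∈ seen, f c = f c' → c = c') : False := by
  have hmap : (seen.map f).Nodup := (List.nodup_map_iff_inj_on hnd).mpr hinj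
  have hsub : (seen.map f).toFinset ⊆ Finset.Icc (0 : Int) 9 := by
    intro x hx
    rcases List.mem_map.mp (List.mem_toFinset.mp hx) with ⟨c, hc, rfl⟩
    exact Finset.mem_Icc.mpr ⟨(hb c hc).1, (hb c hc).2⟩
  have hcard := Finset.card_le_card hsub
  rw [List.toFinset_card_of_nodup hmap, List.length_map] at hcard
  simp only [show (Finset.Icc (0 : Int) 9).card = 10 from by simp] at hcard
  omega

lemma pvB_body (ws : List (List Char)) (r : List Char) :
    (if r.length < ((ws ++ [r]).map (fun w => w.length)).foldl max 0 then false
     else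
      let seen := PySem.List.dedup ((ws ++ [r]).flatMap (fun w => w))
      if 10 < seen.length then false
      else
        let leading : PySem.Set Char :=
          PySem.Set.ofList (((ws ++ [r]).filter (fun w => 1 < w.length)).map (fun w => w.headD ' '))
        let pairs := PySem.List.sorted (seen.map (fun c => (pvCoeff ws r c, c))) (fun q => -|q.1|) false
        pvBt pairs leading 0 [] 0) = true ↔
      (pvN ws r ≤ r.length ∧ pvSolv ws r) := by
  by_cases hlt : r.length < ((ws ++ [r]).map (fun w => w.length)).foldl max 0
  · rw [if_pos hlt]
    simp only [Bool.false_eq_true, false_iff]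
    intro hcon
    have h1 : pvN ws r ≤ r.length := hcon.1
    unfold pvN pvAw at h1
    omega
  · rw [if_neg hlt]
    have hn : pvN ws r ≤ r.length := by unfold pvN pvAw; omega
    have hsnodup : (PySem.List.dedup ((ws ++ [r]).flatMap (fun w => w))).Nodup :=
      PySem.List.nodup_dedup _
    have hmemseen : ∀ c : Char,
        c ∈ PySem.List.dedup ((ws ++ [r]).flatMap (fun w => w)) ↔ c ∈ pvL ws r := by
      intro c
      exact PySem.List.mem_dedup _ c
    by_cases hseen : 10 < (PySem.List.dedup ((ws ++ [r]).flatMap (fun w => w))).length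
    · rw [if_pos hseen]
      simp only [Bool.false_eq_true, false_iff]
      rintro ⟨-, f, hgood, -⟩
      refine pvPigeon (PySem.List.dedup ((ws ++ [r]).flatMap (fun w => w)))
        hsnodup hseen f ?_ ?_
      · intro c hc
        have hcL := (hmemseen c).mp hc
        exact ⟨(hgood.1 c hcL).1, (hgood.1 c hcL).2.1⟩
      · intro c hc c' hc' he
        exact hgood.2 c ((hmemseen c).mp hc) c' ((hmemseen c').mp hc') he
    · rw [if_neg hseen]
      show pvBt (PySem.List.sorted ((PySem.List.dedup ((ws ++ [r]).flatMap (fun w => w))).map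
          (fun c => (pvCoeff ws r c, c))) (fun q => -|q.1|) false) (pvFc ws r) 0 [] 0 = true ↔ _
      set seen := PySem.List.dedup ((ws ++ [r]).flatMap (fun w => w)) with hseendef
      set prs := PySem.List.sorted (seen.map (fun c => (pvCoeff ws r c, c)))
        (fun q => -|q.1|) false with hprsdef
      have hperm : prs.Perm (seen.map (fun c => (pvCoeff ws r c, c))) :=
        PySem.List.sorted_perm _ _ _
      have hsndperm : (prs.map Prod.snd).Perm seen := by
        have h := hperm.map Prod.snd
        simpa [List.map_map, Function.comp_def] using h
      have hnd : (prs.map Prod.snd).Nodup := hsndperm.nodup_iff.mpr hsnodup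
      have hmemsnd : ∀ c : Char, c ∈ prs.map Prod.snd ↔ c ∈ pvL ws r := by
        intro c
        rw [hsndperm.mem_iff]
        exact hmemseen c
      have hsum : ∀ f : Char → Int, (prs.map (fun p => p.1 * f p.2)).sum
          = (ws.map (pvVal f)).sum - pvVal f r := by
        intro f
        have h1 : (prs.map (fun p => p.1 * f p.2)).sum
            = ((seen.map (fun c => (pvCoeff ws r c, c))).map (fun p => p.1 * f p.2)).sum :=
          (hperm.map (fun p => p.1 * f p.2)).sum_eq
        rw [h1, List.map_map]
        have h2 : ((fun p : Int × Char => p.1 * f p.2) ∘ fun c => (pvCoeff ws r c, c))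
            = fun c => pvCoeff ws r c * f c := rfl
        rw [h2]
        refine pvBridge ws r seen hsnodup ?_ ?_ f
        · intro w hw c hc
          exact (hmemseen c).mpr (pvMem_L ws r w (List.mem_append_left _ hw) c hc)
        · intro c hc
          exact (hmemseen c).mpr (pvMem_L ws r r (pvR_mem_aw ws r) c hc)
      have hbt := pvBt_iff prs (pvFc ws r) hnd prs.length 0 [] 0 (fun _ => 0)
        (by omega) (by simp) (by intro d; simp)
        (by intro p hp; simp at hp) (by intro p hp; simp at hp)
      rw [hbt]
      simp only [List.take_zero]
      constructor
      · rintro ⟨f, -, hb, hinj, hz⟩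
        refine ⟨hn, f, ⟨?_, ?_⟩, ?_⟩
        · intro c hc
          rcases List.mem_map.mp ((hmemsnd c).mpr hc) with ⟨p, hp, rfl⟩
          exact hb p hp
        · intro c hc c' hc' he
          rcases List.mem_map.mp ((hmemsnd c).mpr hc) with ⟨p, hp, rfl⟩
          rcases List.mem_map.mp ((hmemsnd c').mpr hc') with ⟨q, hq, rfl⟩
          exact hinj p hp q hq he
        · rw [hsum f] at hz
          unfold pvEqn
          have he : (fun w => pvHi f w 0) = pvVal f := funext (fun w => pvHi_zero f w)
          rw [he, pvHi_zero f r]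
          omega
      · rintro ⟨-, f, hgood, heqn⟩
        have hpL : ∀ p ∈ prs, p.2 ∈ pvL ws r := by
          intro p hp
          exact (hmemsnd p.2).mp (List.mem_map_of_mem hp)
        refine ⟨f, (by intro p hp; simp at hp), ?_, ?_, ?_⟩
        · intro p hp
          exact hgood.1 p.2 (hpL p hp)
        · intro p hp q hq he
          exact hgood.2 p.2 (hpL p hp) q.2 (hpL q hq) he
        · rw [hsum f]
          unfold pvEqn at heqn
          have he : (fun w => pvHi f w 0) = pvVal f := funext (fun w => pvHi_zero f w)
          rw [he, pvHi_zero f r] at heqn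
          omega

lemma pvB_char (words : List String) (result : String) :
    isSolvable_alt words result = true ↔
      (pvN (words.map String.toList) result.toList ≤ result.toList.length ∧
        pvSolv (words.map String.toList) result.toList) :=
  pvB_body (words.map String.toList) result.toList

-- ===== VERDICT (by name: the statement is the Claim_ definition above) =====
theorem isSolvable_spec : Claim_equal_isSolvable := by
  intro words result _
  unfold Spec_isSolvable
  rw [Bool.eq_iff_iff, pvA_char, pvB_char]
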